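-- pv_equiv track=rewrite | github.com/tfcp68/manual-projects | Исходники/Глава 3. Часть 1/8. Сортировка подсчетами/Python/CountingSortForNegtive.py | counting_sort_negative
-- ===== SOURCE A (Python) =====
-- def counting_sort_negative(array):
--     low = min(array)
--     high = max(array)
--
--     count = [0 for _ in range(low, high + 1)]
--     result = [0] * len(array)
--     for i in array:
--         count[i - low] += 1
--
--     for j in range(1, len(count)):
--         count[j] += count[j - 1]
--
--     for i in reversed(array):
--         count[i - low] -= 1
--         result[count[i - low]] = i
--
--     return result
-- ===== SOURCE B (Python) =====
-- def counting_sort_negative(array):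
--     low = min(array)
--     high = max(array)
--
--     count = [0] * (high - low + 1)
--     for i in array:
--         count[i - low] += 1
--
--     result = []
--     for j in range(len(count)):
--         result.extend([low + j] * count[j])
--     return result
-- ===== Notes on version B (the rewrite author's own statement) =====
-- stated objective: simpler
-- what changed: The prefix-sum pass and the reverse stable-scatter pass are replaced by a single forward sweep over the value range that emits each value count[j] times, so no prefix sums and no random-access writes into a preallocated result are needed.
import Mathlib
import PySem

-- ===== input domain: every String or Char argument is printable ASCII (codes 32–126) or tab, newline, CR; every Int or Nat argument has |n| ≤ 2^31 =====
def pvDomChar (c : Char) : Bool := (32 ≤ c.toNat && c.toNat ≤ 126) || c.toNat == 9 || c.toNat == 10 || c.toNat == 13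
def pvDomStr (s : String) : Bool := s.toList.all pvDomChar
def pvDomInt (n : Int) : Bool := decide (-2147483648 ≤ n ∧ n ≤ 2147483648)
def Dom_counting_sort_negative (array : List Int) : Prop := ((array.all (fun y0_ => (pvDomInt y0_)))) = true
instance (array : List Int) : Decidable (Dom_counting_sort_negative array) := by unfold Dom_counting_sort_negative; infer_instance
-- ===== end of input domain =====

-- B replaces A's prefix-sum pass and reverse stable-scatter pass by one forward sweep over the
-- value range that appends each value count[j] times (objective: simpler; same return value).

-- ===== PORT A =====
-- Python lists are arrays: 'count' is an Array Int; pyAGet/pyASet are Python's indexed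
-- read/write (negative index from the end; an index Python would raise IndexError on
-- reads the default 0 / writes nothing — such indices never occur on a nonempty input,
-- since every i satisfies low <= i <= high and the scatter positions are in range).
def pyAGet (a : Array Int) (i : Int) : Int :=
  match PySem.List.pyIdx? a.size i with
  | some k => (a[k]?).getD 0
  | none => 0

def pyASet (a : Array Int) (i : Int) (v : Int) : Array Int :=
  match PySem.List.pyIdx? a.size i with
  | some k => a.setIfInBounds k v
  | none => a

def counting_sort_negative (array : List Int) : List Int :=
  match PySem.List.min? array (fun x => x), PySem.List.max? array (fun x => x) with
  | some low, some high =>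
    let count0 : Array Int := ((PySem.List.pyRange low (high + 1) 1).map (fun _ => (0 : Int))).toArray
    let result0 : List Int := PySem.List.pyRepeat [(0 : Int)] (array.length : Int)
    let count1 := array.foldl (fun c i => pyASet c (i - low) (pyAGet c (i - low) + 1)) count0
    let count2 := (PySem.List.pyRange 1 (count1.size : Int) 1).foldl (fun c j =>
        pyASet c j (pyAGet c j + pyAGet c (j - 1))) count1
    (array.reverse.foldl (fun (s : Array Int × List Int) i =>
        let c := pyASet s.1 (i - low) (pyAGet s.1 (i - low) - 1)
        (c, PySem.List.pySetD s.2 (pyAGet c (i - low)) i)) (count2, result0)).2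
  | _, _ => []  -- unreachable under Pre_ (min/max raise ValueError on an empty list)

-- ===== PORT B =====
def counting_sort_negative_alt (array : List Int) : List Int :=
  match PySem.List.min? array (fun x => x) with
  | none => []  -- unreachable under Pre_ (min raises ValueError on an empty list)
  | some low =>
    match PySem.List.max? array (fun x => x) with
    | none => []  -- unreachable under Pre_
    | some high =>
      let count0 : Array Int := (PySem.List.pyRepeat [(0 : Int)] (high - low + 1)).toArray
      let count := array.foldl (fun c i => pyASet c (i - low) (pyAGet c (i - low) + 1)) count0
      (PySem.List.pyRange 0 (count.size : Int) 1).foldl (fun res j =>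
          res ++ PySem.List.pyRepeat [low + j] (pyAGet count j)) []

-- ===== PRECONDITION & SPEC =====
-- Pre_ excludes exactly the empty list, on which A (and B) raise ValueError via min().
def Pre_counting_sort_negative (array : List Int) : Prop := array ≠ []
instance (array : List Int) : Decidable (Pre_counting_sort_negative array) := by
  unfold Pre_counting_sort_negative; infer_instance
def pvWitness_counting_sort_negative : List Int := [3, -1, 2, -1, 0]

def Spec_counting_sort_negative (array : List Int) (out : List Int) : Prop := out = counting_sort_negative_alt array
instance (array : List Int) (out : List Int) : Decidable (Spec_counting_sort_negative array out) := by unfold Spec_counting_sort_negative; infer_instance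

-- ===== CLAIM (what is proved, stated in full; the proofs are below) =====
def Claim_equal_counting_sort_negative : Prop := ∀ (array : List Int), Dom_counting_sort_negative array → Pre_counting_sort_negative array → Spec_counting_sort_negative array (counting_sort_negative array)

-- ===== LEMMAS AND PROOFS =====

-- List-level models of the two ports (same algorithms with the count array as a List);
-- each port is first proved equal to its model, then the models are proved equal.
def csSortL_A (array : List Int) : List Int :=
  match PySem.List.min? array (fun x => x), PySem.List.max? array (fun x => x) with
  | some low, some high =>
    let count0 : List Int := (PySem.List.pyRange low (high + 1) 1).map (fun _ => 0)
    let result0 : List Int := PySem.List.pyRepeat [(0 : Int)] (array.length : Int)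
    let count1 := array.foldl (fun c i =>
        PySem.List.pySetD c (i - low) (PySem.List.pyGetD c (i - low) 0 + 1)) count0
    let count2 := (PySem.List.pyRange 1 (count1.length : Int) 1).foldl (fun c j =>
        PySem.List.pySetD c j (PySem.List.pyGetD c j 0 + PySem.List.pyGetD c (j - 1) 0)) count1
    (array.reverse.foldl (fun (s : List Int × List Int) i =>
        let c := PySem.List.pySetD s.1 (i - low) (PySem.List.pyGetD s.1 (i - low) 0 - 1)
        (c, PySem.List.pySetD s.2 (PySem.List.pyGetD c (i - low) 0) i)) (count2, result0)).2
  | _, _ => []  -- unreachable under Pre_ (min/max raise ValueError on an empty list)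

def csSortL_B (array : List Int) : List Int :=
  match PySem.List.min? array (fun x => x) with
  | none => []  -- unreachable under Pre_ (min raises ValueError on an empty list)
  | some low =>
    match PySem.List.max? array (fun x => x) with
    | none => []  -- unreachable under Pre_
    | some high =>
      let count0 : List Int := PySem.List.pyRepeat [(0 : Int)] (high - low + 1)
      let count := array.foldl (fun c i =>
          PySem.List.pySetD c (i - low) (PySem.List.pyGetD c (i - low) 0 + 1)) count0
      (PySem.List.pyRange 0 (count.length : Int) 1).foldl (fun res j =>
          res ++ PySem.List.pyRepeat [low + j] (PySem.List.pyGetD count j 0)) []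

theorem pyAGet_eq (a : Array Int) (i : Int) : pyAGet a i = PySem.List.pyGetD a.toList i 0 := by
  unfold pyAGet PySem.List.pyGetD PySem.List.pyGet?
  rw [Array.length_toList]
  cases h : PySem.List.pyIdx? a.size i with
  | none => simp
  | some k => simp

theorem pyASet_toList (a : Array Int) (i v : Int) :
    (pyASet a i v).toList = PySem.List.pySetD a.toList i v := by
  unfold pyASet PySem.List.pySetD PySem.List.pySet?
  rw [Array.length_toList]
  cases h : PySem.List.pyIdx? a.size i with
  | none => simp
  | some k => simp [Array.toList_setIfInBounds]

theorem foldl_toList_bridge {β : Type} (f : Array Int → β → Array Int) (g : List Int → β → List Int)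
    (h : ∀ a b, (f a b).toList = g a.toList b) :
    ∀ (l : List β) (c : Array Int), (l.foldl f c).toList = l.foldl g c.toList := by
  intro l
  induction l with
  | nil => intro c; rfl
  | cons x t ih => intro c; rw [List.foldl_cons, List.foldl_cons, ih, h]

theorem foldl_pair_bridge (f : (Array Int × List Int) → Int → (Array Int × List Int))
    (g : (List Int × List Int) → Int → (List Int × List Int))
    (h : ∀ s b, ((f s b).1.toList, (f s b).2) = g (s.1.toList, s.2) b) :
    ∀ (l : List Int) (s : Array Int × List Int),
      ((l.foldl f s).1.toList, (l.foldl f s).2) = l.foldl g (s.1.toList, s.2) := by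
  intro l
  induction l with
  | nil => intro s; rfl
  | cons x t ih => intro s; rw [List.foldl_cons, List.foldl_cons, ih, h]

-- helper: getD of set
theorem csGetD_set (c : List Int) (k j : Nat) (v : Int) :
    (c.set k v).getD j 0 = if j = k ∧ k < c.length then v else c.getD j 0 := by
  simp only [List.getD_eq_getElem?_getD, List.getElem?_set]
  by_cases h1 : k = j
  · subst h1
    by_cases h2 : k < c.length <;> simp [h2]
  · simp [h1, Ne.symm h1]

theorem csCount_loop (low : Int) :
    ∀ (l : List Int) (c : List Int),
    (∀ i ∈ l, 0 ≤ i - low ∧ i - low < (c.length : Int)) →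
    (l.foldl (fun c i => PySem.List.pySetD c (i - low) (PySem.List.pyGetD c (i - low) 0 + 1)) c).length = c.length ∧
    ∀ j : Nat, j < c.length →
      (l.foldl (fun c i => PySem.List.pySetD c (i - low) (PySem.List.pyGetD c (i - low) 0 + 1)) c).getD j 0
        = c.getD j 0 + l.count (low + (j : Int)) := by
  intro l
  induction l with
  | nil => intro c _; simp
  | cons x t ih =>
    intro c h
    obtain ⟨hx1, hx2⟩ := h x (by simp)
    have hk : x - low = (((x - low).toNat : Nat) : Int) := (Int.toNat_of_nonneg hx1).symm
    set k := (x - low).toNat with hkdef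
    have hklen : k < c.length := by omega
    have hc' : PySem.List.pySetD c (x - low) (PySem.List.pyGetD c (x - low) 0 + 1)
        = c.set k (c.getD k 0 + 1) := by
      rw [hk]; simp
    simp only [List.foldl_cons]
    rw [hc']
    obtain ⟨ihlen, ihget⟩ := ih (c.set k (c.getD k 0 + 1))
      (by intro i hi; simpa using h i (by simp [hi]))
    refine ⟨by simpa using ihlen, ?_⟩
    intro j hj
    rw [ihget j (by simpa using hj), csGetD_set]
    by_cases hjk : j = k
    · have hx : x = low + (j : Int) := by omega
      simp [hjk, hklen, hx]
      omega
    · have hx : ¬ (x == low + (j : Int)) := by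
        simp only [beq_iff_eq]; omega
      simp [hjk, List.count_cons, hx]

def csPre (c : List Int) : Nat → Int
  | 0 => 0
  | j + 1 => csPre c j + c.getD j 0

theorem csPrefix_loop (c : List Int) :
    ∀ k : Nat, k ≤ c.length →
    ((PySem.List.pyRange 1 (k : Int) 1).foldl (fun c j =>
        PySem.List.pySetD c j (PySem.List.pyGetD c j 0 + PySem.List.pyGetD c (j - 1) 0)) c).length = c.length ∧
    (∀ j : Nat, j < k →
      ((PySem.List.pyRange 1 (k : Int) 1).foldl (fun c j =>
        PySem.List.pySetD c j (PySem.List.pyGetD c j 0 + PySem.List.pyGetD c (j - 1) 0)) c).getD j 0 = csPre c (j + 1)) ∧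
    (∀ j : Nat, k ≤ j →
      ((PySem.List.pyRange 1 (k : Int) 1).foldl (fun c j =>
        PySem.List.pySetD c j (PySem.List.pyGetD c j 0 + PySem.List.pyGetD c (j - 1) 0)) c).getD j 0 = c.getD j 0) := by
  intro k
  induction k with
  | zero =>
    intro _
    rw [PySem.List.pyRange_one_eq_nil (by norm_num)]
    simp
  | succ k ih =>
    intro hk
    rcases Nat.eq_zero_or_pos k with hk0 | hkpos
    · subst hk0
      rw [show ((1:Nat) : Int) = 1 by norm_num, PySem.List.pyRange_one_eq_nil (by norm_num)]
      refine ⟨rfl, ?_, fun j _ => rfl⟩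
      intro j hj
      interval_cases j
      simp [csPre]
    · obtain ⟨ihlen, ihget, ihrest⟩ := ih (by omega)
      have hsplit : PySem.List.pyRange 1 ((k + 1 : Nat) : Int) 1
          = PySem.List.pyRange 1 (k : Int) 1 ++ [(k : Int)] := by
        push_cast
        exact PySem.List.pyRange_one_succ_right (by exact_mod_cast hkpos)
      rw [hsplit, List.foldl_append]
      set c2 := (PySem.List.pyRange 1 (k : Int) 1).foldl (fun c j =>
        PySem.List.pySetD c j (PySem.List.pyGetD c j 0 + PySem.List.pyGetD c (j - 1) 0)) c with hc2
      simp only [List.foldl_cons, List.foldl_nil]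
      have hkm1 : (k : Int) - 1 = (((k - 1 : Nat)) : Int) := by omega
      have hstep : PySem.List.pySetD c2 (k : Int) (PySem.List.pyGetD c2 (k : Int) 0 + PySem.List.pyGetD c2 ((k : Int) - 1) 0)
          = c2.set k (c2.getD k 0 + c2.getD (k - 1) 0) := by
        rw [hkm1]; simp
      rw [hstep]
      have hval : c2.getD k 0 + c2.getD (k - 1) 0 = csPre c (k + 1) := by
        rw [ihrest k (le_refl k), ihget (k - 1) (by omega)]
        have : k - 1 + 1 = k := by omega
        rw [this]
        simp only [csPre]
        ring
      refine ⟨by simpa using ihlen, ?_, ?_⟩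
      · intro j hj
        rw [csGetD_set]
        by_cases hjk : j = k
        · subst hjk; rw [if_pos ⟨rfl, by omega⟩]; exact hval
        · rw [if_neg (by simp [hjk]), ihget j (by omega)]
      · intro j hj
        rw [csGetD_set, if_neg (by omega), ihrest j (by omega)]

def csStep (low : Int) (s : List Int × List Int) (i : Int) : List Int × List Int :=
  let c := PySem.List.pySetD s.1 (i - low) (PySem.List.pyGetD s.1 (i - low) 0 - 1)
  (c, PySem.List.pySetD s.2 (PySem.List.pyGetD c (i - low) 0) i)

theorem csScatter (low : Int) :
    ∀ (l : List Int) (c r : List Int),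
    (∀ i ∈ l, 0 ≤ i - low ∧ i - low < (c.length : Int)) →
    (∀ j : Nat, j < c.length → 0 ≤ c.getD j 0 - l.count (low + (j : Int))) →
    (∀ j j' : Nat, j < j' → j' < c.length → c.getD j 0 ≤ c.getD j' 0 - l.count (low + (j' : Int))) →
    (∀ j : Nat, j < c.length → c.getD j 0 ≤ (r.length : Int)) →
    (l.foldl (csStep low) (c, r)).2.length = r.length ∧
    (∀ j : Nat, j < c.length → ∀ p : Nat,
        c.getD j 0 - l.count (low + (j : Int)) ≤ (p : Int) → (p : Int) < c.getD j 0 →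
        (l.foldl (csStep low) (c, r)).2.getD p 0 = low + j) ∧
    (∀ p : Nat, (∀ j : Nat, j < c.length →
        ¬(c.getD j 0 - l.count (low + (j : Int)) ≤ (p : Int) ∧ (p : Int) < c.getD j 0)) →
        (l.foldl (csStep low) (c, r)).2.getD p 0 = r.getD p 0) := by
  intro l
  induction l with
  | nil =>
    intro c r _ _ _ _
    refine ⟨rfl, ?_, fun p _ => rfl⟩
    intro j hj p h1 h2
    simp only [List.count_nil, Int.natCast_zero, sub_zero] at h1
    omega
  | cons x t ih =>
    intro c r hmem hlb hdisj hlen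
    obtain ⟨hx1, hx2⟩ := hmem x (by simp)
    have hk : x - low = (((x - low).toNat : Nat) : Int) := (Int.toNat_of_nonneg hx1).symm
    set k := (x - low).toNat with hkdef
    have hklen : k < c.length := by omega
    have hxval : x = low + (k : Int) := by omega
    have hcntk : ((x :: t).count (low + (k : Int)) : Int) = (t.count (low + (k : Int)) : Int) + 1 := by
      rw [List.count_cons]
      simp [hxval]
    have hcntne : ∀ j : Nat, j ≠ k → ((x :: t).count (low + (j : Int)) : Int) = (t.count (low + (j : Int)) : Int) := by
      intro j hj
      rw [List.count_cons]
      have : ¬ (x == low + (j : Int)) := by simp only [beq_iff_eq]; omega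
      simp [this]
    have hDk1 : 1 ≤ c.getD k 0 := by
      have h := hlb k hklen
      rw [hcntk] at h
      have : (0 : Int) ≤ (t.count (low + (k : Int)) : Int) := Int.natCast_nonneg _
      omega
    set c1 := c.set k (c.getD k 0 - 1) with hc1def
    have hp0 : c.getD k 0 - 1 = (((c.getD k 0 - 1).toNat : Nat) : Int) := (Int.toNat_of_nonneg (by omega)).symm
    set p0 := (c.getD k 0 - 1).toNat with hp0def
    have hp0len : p0 < r.length := by
      have := hlen k hklen
      omega
    have hc1get : ∀ j : Nat, c1.getD j 0 = if j = k then c.getD k 0 - 1 else c.getD j 0 := by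
      intro j
      rw [hc1def, csGetD_set]
      by_cases hj : j = k
      · simp [hj, hklen]
      · simp [hj]
    have hc1len : c1.length = c.length := by simp [hc1def]
    have hstep : csStep low (c, r) x = (c1, r.set p0 x) := by
      show (PySem.List.pySetD c (x - low) (PySem.List.pyGetD c (x - low) 0 - 1),
            PySem.List.pySetD r (PySem.List.pyGetD (PySem.List.pySetD c (x - low)
              (PySem.List.pyGetD c (x - low) 0 - 1)) (x - low) 0) x) = (c1, r.set p0 x)
      rw [hk]
      simp only [PySem.List.pySetD_natCast, PySem.List.pyGetD_natCast]
      rw [show (c.set k (c.getD k 0 - 1)).getD k 0 = ((p0 : Nat) : Int) from by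
        rw [csGetD_set, if_pos ⟨rfl, hklen⟩]; exact hp0]
      simp only [PySem.List.pySetD_natCast]
      rw [hc1def]
    have hm' : ∀ i ∈ t, 0 ≤ i - low ∧ i - low < (c1.length : Int) := by
      intro i hi
      rw [hc1len]
      exact hmem i (List.mem_cons_of_mem _ hi)
    have hlb' : ∀ j : Nat, j < c1.length → 0 ≤ c1.getD j 0 - (t.count (low + (j : Int)) : Int) := by
      intro j hj
      rw [hc1len] at hj
      rw [hc1get j]
      by_cases hjk : j = k
      · rw [hjk, if_pos rfl]
        have h := hlb k hklen
        rw [hcntk] at h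
        omega
      · rw [if_neg hjk]
        have h := hlb j hj
        rw [hcntne j hjk] at h
        exact h
    have hdisj' : ∀ j j' : Nat, j < j' → j' < c1.length →
        c1.getD j 0 ≤ c1.getD j' 0 - (t.count (low + (j' : Int)) : Int) := by
      intro j j' hjj' hj'
      rw [hc1len] at hj'
      rw [hc1get j, hc1get j']
      by_cases hj'k : j' = k
      · have hjk : j ≠ k := by omega
        rw [if_neg hjk, hj'k, if_pos rfl]
        have h := hdisj j k (by omega) hklen
        rw [hcntk] at h
        omega
      · rw [if_neg hj'k]
        have h := hdisj j j' hjj' hj'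
        rw [hcntne j' hj'k] at h
        by_cases hjk : j = k
        · rw [if_pos hjk]
          rw [hjk] at h
          omega
        · rw [if_neg hjk]
          exact h
    have hlen' : ∀ j : Nat, j < c1.length → c1.getD j 0 ≤ ((r.set p0 x).length : Int) := by
      intro j hj
      rw [hc1len] at hj
      rw [List.length_set, hc1get j]
      have h := hlen j hj
      by_cases hjk : j = k
      · rw [if_pos hjk]
        have := hlen k hklen
        omega
      · rw [if_neg hjk]
        exact h
    obtain ⟨ihlen, ihget, ihrest⟩ := ih c1 (r.set p0 x) hm' hlb' hdisj' hlen'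
    rw [List.foldl_cons, hstep]
    refine ⟨by rw [ihlen]; simp, ?_, ?_⟩
    · -- interval clause
      intro j hj p h1 h2
      by_cases hjk : j = k
      · rw [hjk] at h1 h2 ⊢
        rw [hcntk] at h1
        by_cases hplt : (p : Int) < c.getD k 0 - 1
        · refine ihget k (by omega) p ?_ ?_
          · rw [hc1get k, if_pos rfl]; omega
          · rw [hc1get k, if_pos rfl]; exact hplt
        · -- p is exactly the slot written in this step
          have hpp0 : p = p0 := by omega
          rw [ihrest p ?_, hpp0, csGetD_set, if_pos ⟨rfl, hp0len⟩]
          · exact hxval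
          · intro j' hj'
            rw [hc1len] at hj'
            rw [hc1get j']
            by_cases hj'k : j' = k
            · rw [hj'k, if_pos rfl]
              rintro ⟨-, hb⟩
              omega
            · rw [if_neg hj'k]
              rcases Nat.lt_or_ge j' k with hlt | hge
              · have h := hdisj j' k hlt hklen
                rw [hcntk] at h
                have : (0 : Int) ≤ (t.count (low + (k : Int)) : Int) := Int.natCast_nonneg _
                rintro ⟨-, hb⟩
                omega
              · have hgt : k < j' := by omega
                have h := hdisj k j' hgt hj'
                rw [hcntne j' hj'k] at h
                rintro ⟨ha, -⟩
                omega
      · rw [hcntne j hjk] at h1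
        refine ihget j (by omega) p ?_ ?_
        · rw [hc1get j, if_neg hjk]; exact h1
        · rw [hc1get j, if_neg hjk]; exact h2
    · -- untouched clause
      intro p hp
      have hpne : p ≠ p0 := by
        intro he
        refine hp k hklen ⟨?_, ?_⟩
        · rw [hcntk]
          have : (0 : Int) ≤ (t.count (low + (k : Int)) : Int) := Int.natCast_nonneg _
          omega
        · omega
      rw [ihrest p ?_, csGetD_set, if_neg (fun h => hpne h.1)]
      intro j' hj'
      rw [hc1len] at hj'
      rw [hc1get j']
      have hp' := hp j' hj'
      by_cases hj'k : j' = k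
      · rw [hj'k, if_pos rfl]
        rw [hj'k] at hp'
        rw [hcntk] at hp'  -- hmm hp' is a negation containing the count term
        rintro ⟨ha, hb⟩
        exact hp' ⟨by omega, by omega⟩
      · rw [if_neg hj'k]
        rw [hcntne j' hj'k] at hp'
        exact hp'

def csCum (a : List Int) (low : Int) : Nat → Nat
  | 0 => 0
  | j + 1 => csCum a low j + a.count (low + (j : Int))

def csBuild (a : List Int) (low : Int) : Nat → List Int
  | 0 => []
  | j + 1 => csBuild a low j ++ List.replicate (a.count (low + (j : Int))) (low + (j : Int))

theorem csCum_mono (a : List Int) (low : Int) : ∀ j' j : Nat, j ≤ j' → csCum a low j ≤ csCum a low j' := by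
  intro j'
  induction j' with
  | zero => intro j h; obtain rfl : j = 0 := Nat.le_zero.mp h; exact le_rfl
  | succ j' ih =>
    intro j h
    rcases Nat.eq_or_lt_of_le h with h1 | h1
    · subst h1; exact le_rfl
    · have := ih j (by omega)
      simp only [csCum]
      omega

theorem csCum_cons (x : Int) (a : List Int) (low : Int) (m : Nat) :
    csCum (x :: a) low m = csCum a low m + (if 0 ≤ x - low ∧ x - low < (m : Int) then 1 else 0) := by
  induction m with
  | zero => simp [csCum]
  | succ m ih =>
    simp only [csCum, ih, List.count_cons, beq_iff_eq]
    split_ifs <;> omega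

theorem csCum_length (low : Int) (m : Nat) :
    ∀ a : List Int, (∀ i ∈ a, 0 ≤ i - low ∧ i - low < (m : Int)) → csCum a low m = a.length := by
  intro a
  induction a with
  | nil =>
    intro _
    induction m with
    | zero => rfl
    | succ m ih => simp [csCum, ih]
  | cons x t ih =>
    intro h
    rw [csCum_cons, ih (fun i hi => h i (List.mem_cons_of_mem _ hi)),
      if_pos (h x (by simp))]
    simp

theorem csBuild_length (a : List Int) (low : Int) (m : Nat) :
    (csBuild a low m).length = csCum a low m := by
  induction m with
  | zero => rfl
  | succ m ih => simp [csBuild, csCum, ih]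

theorem csBuild_getD (a : List Int) (low : Int) :
    ∀ m j p : Nat, j < m → csCum a low j ≤ p → p < csCum a low (j + 1) →
    (csBuild a low m).getD p 0 = low + (j : Int) := by
  intro m
  induction m with
  | zero => intro j p h; omega
  | succ m ih =>
    intro j p hj h1 h2
    rcases Nat.lt_or_ge j m with hjm | hjm
    · have hp : p < (csBuild a low m).length := by
        rw [csBuild_length]
        have := csCum_mono a low m (j + 1) (by omega)
        omega
      simp only [csBuild]
      rw [List.getD_eq_getElem?_getD, List.getElem?_append_left hp, ← List.getD_eq_getElem?_getD]
      exact ih j p hjm h1 h2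
    · have hjeq : j = m := by omega
      subst hjeq
      have hp : p = (csBuild a low j).length + (p - csCum a low j) := by
        rw [csBuild_length]; omega
      simp only [csBuild]
      rw [List.getD_eq_getElem?_getD, hp, List.getElem?_append_right (by omega)]
      have hlt : p - csCum a low j < a.count (low + (j : Int)) := by
        simp only [csCum] at h2
        omega
      simp [hlt]

theorem csStair (a : List Int) (low : Int) :
    ∀ m p : Nat, p < csCum a low m → ∃ j : Nat, j < m ∧ csCum a low j ≤ p ∧ p < csCum a low (j + 1) := by
  intro m
  induction m with
  | zero => intro p h; simp [csCum] at h
  | succ m ih =>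
    intro p h
    rcases Nat.lt_or_ge p (csCum a low m) with h1 | h1
    · obtain ⟨j, hj⟩ := ih p h1
      exact ⟨j, by omega, hj.2.1, hj.2.2⟩
    · exact ⟨m, by omega, h1, h⟩

theorem csPre_cum (a : List Int) (low : Int) (c : List Int) (m : Nat)
    (hget : ∀ t : Nat, t < m → c.getD t 0 = (a.count (low + (t : Int)) : Int)) :
    ∀ j : Nat, j ≤ m → csPre c j = (csCum a low j : Int) := by
  intro j
  induction j with
  | zero => intro _; rfl
  | succ j ih =>
    intro hj
    simp only [csPre, csCum, ih (by omega), hget j (by omega)]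
    push_cast
    ring

theorem csEmit (a : List Int) (low : Int) (c : List Int)
    (hget : ∀ t : Nat, t < c.length → c.getD t 0 = (a.count (low + (t : Int)) : Int)) :
    ∀ k : Nat, k ≤ c.length →
    ((PySem.List.pyRange 0 (k : Int) 1).foldl (fun res j =>
        res ++ PySem.List.pyRepeat [low + j] (PySem.List.pyGetD c j 0)) []) = csBuild a low k := by
  intro k
  induction k with
  | zero =>
    intro _
    rw [show ((0 : Nat) : Int) = 0 by norm_num, PySem.List.pyRange_one_eq_nil (by norm_num)]
    rfl
  | succ k ih =>
    intro hk
    have hsplit : PySem.List.pyRange 0 ((k + 1 : Nat) : Int) 1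
        = PySem.List.pyRange 0 (k : Int) 1 ++ [(k : Int)] := by
      push_cast
      exact PySem.List.pyRange_one_succ_right (by positivity)
    rw [hsplit, List.foldl_append, ih (by omega)]
    simp only [List.foldl_cons, List.foldl_nil]
    rw [PySem.List.pyGetD_natCast, hget k (by omega), PySem.List.pyRepeat_singleton]
    simp [csBuild]

theorem cs_main (array : List Int) (hpre : array ≠ []) :
    csSortL_A array = csSortL_B array := by
  rcases hmin : PySem.List.min? array (fun x => x) with _ | low
  · rw [PySem.List.min?_eq_none_iff] at hmin; exact absurd hmin hpre
  rcases hmax : PySem.List.max? array (fun x => x) with _ | high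
  · rw [PySem.List.max?_eq_none_iff] at hmax; exact absurd hmax hpre
  have hlo : ∀ i ∈ array, low ≤ i := fun i hi => PySem.List.min?_isMin hmin i hi
  have hhi : ∀ i ∈ array, i ≤ high := fun i hi => PySem.List.max?_isMax hmax i hi
  obtain ⟨x0, hx0⟩ := List.exists_mem_of_ne_nil array hpre
  have hlh : low ≤ high := le_trans (hlo x0 hx0) (hhi x0 hx0)
  set m := (high + 1 - low).toNat with hmdef
  have hm : (m : Int) = high + 1 - low := Int.toNat_of_nonneg (by omega)
  have hmem : ∀ i ∈ array, 0 ≤ i - low ∧ i - low < (m : Int) := by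
    intro i hi
    have := hlo i hi
    have := hhi i hi
    omega
  -- the shared count-0 list
  have hc0len : (List.replicate m (0 : Int)).length = m := List.length_replicate
  have hc0get : ∀ j : Nat, j < m → (List.replicate m (0 : Int)).getD j 0 = 0 := by
    intro j hj
    simp [List.getD_eq_getElem?_getD, hj]
  -- the counting loop (identical source line in A and B)
  set cList := array.foldl (fun c i =>
      PySem.List.pySetD c (i - low) (PySem.List.pyGetD c (i - low) 0 + 1)) (List.replicate m (0 : Int))
    with hcListdef
  obtain ⟨hclen, hcget0⟩ := csCount_loop low array (List.replicate m (0 : Int)) (by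
    intro i hi; rw [hc0len]; exact hmem i hi)
  rw [hc0len] at hclen
  have hcget : ∀ j : Nat, j < m → cList.getD j 0 = (array.count (low + (j : Int)) : Int) := by
    intro j hj
    rw [hcListdef, hcget0 j (by rw [hc0len]; exact hj), hc0get j hj]
    ring
  -- A's prefix-sum loop
  obtain ⟨hplen, hpget, -⟩ := csPrefix_loop cList cList.length le_rfl
  set c2 := (PySem.List.pyRange 1 ((cList.length : Nat) : Int) 1).foldl (fun c j =>
      PySem.List.pySetD c j (PySem.List.pyGetD c j 0 + PySem.List.pyGetD c (j - 1) 0)) cList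
    with hc2def
  have hc2len : c2.length = m := by rw [hplen, hclen]
  have hc2get : ∀ j : Nat, j < m → c2.getD j 0 = (csCum array low (j + 1) : Int) := by
    intro j hj
    rw [hpget j (by omega), csPre_cum array low cList m hcget (j + 1) (by omega)]
  -- scatter hypotheses
  have hcumlen : csCum array low m = array.length := csCum_length low m array hmem
  obtain ⟨hslen, hsget, -⟩ := csScatter low array.reverse c2 (List.replicate array.length (0 : Int))
    (by intro i hi
        rw [hc2len]
        exact hmem i (List.mem_reverse.mp hi))
    (by intro j hj
        rw [hc2len] at hj
        rw [hc2get j hj, List.count_reverse]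
        have : csCum array low (j + 1) = csCum array low j + array.count (low + (j : Int)) := rfl
        omega)
    (by intro j j' hjj' hj'
        rw [hc2len] at hj'
        rw [hc2get j (by omega), hc2get j' hj', List.count_reverse]
        have h1 : csCum array low (j' + 1) = csCum array low j' + array.count (low + (j' : Int)) := rfl
        have h2 := csCum_mono array low j' (j + 1) (by omega)
        omega)
    (by intro j hj
        rw [hc2len] at hj
        rw [hc2get j hj, List.length_replicate]
        have h1 := csCum_mono array low m (j + 1) (by omega)
        omega)
  -- unfold the two ports
  unfold csSortL_A csSortL_B
  rw [hmin, hmax]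
  simp only []
  have hA0 : List.map (fun _ => (0 : Int)) (PySem.List.pyRange low (high + 1) 1) = List.replicate m 0 := by
    rw [List.map_const', PySem.List.length_pyRange_one]
  have hB0 : PySem.List.pyRepeat [(0 : Int)] (high - low + 1) = List.replicate m 0 := by
    rw [PySem.List.pyRepeat_singleton]
    congr 1
    omega
  have hR0 : PySem.List.pyRepeat [(0 : Int)] ((array.length : Nat) : Int) = List.replicate array.length 0 := by
    rw [PySem.List.pyRepeat_singleton]
    simp
  rw [hA0, hB0, hR0, ← hcListdef, ← hc2def,
    show (fun (s : List Int × List Int) i =>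
      (PySem.List.pySetD s.1 (i - low) (PySem.List.pyGetD s.1 (i - low) 0 - 1),
        PySem.List.pySetD s.2
          (PySem.List.pyGetD (PySem.List.pySetD s.1 (i - low) (PySem.List.pyGetD s.1 (i - low) 0 - 1)) (i - low) 0)
          i)) = csStep low from rfl,
    csEmit array low cList (by rw [hclen]; exact hcget) cList.length le_rfl, hclen]
  have houtlen : (List.foldl (csStep low) (c2, List.replicate array.length 0) array.reverse).2.length
      = array.length := by rw [hslen, List.length_replicate]
  apply List.ext_getElem
  · rw [houtlen, csBuild_length, hcumlen]
  · intro p hp1 hp2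
    have hpn : p < array.length := by rw [← houtlen]; exact hp1
    obtain ⟨j, hj, h1, h2⟩ := csStair array low m p (by rw [hcumlen]; exact hpn)
    rw [← List.getD_eq_getElem _ 0 hp1, ← List.getD_eq_getElem _ 0 hp2,
      hsget j (by rw [hc2len]; exact hj) p
        (by rw [hc2get j hj, List.count_reverse]
            have hrec : csCum array low (j + 1) = csCum array low j + array.count (low + (j : Int)) := rfl
            omega)
        (by rw [hc2get j hj]
            omega),
      csBuild_getD array low m j p hj h1 h2]

theorem portA_models (array : List Int) : counting_sort_negative array = csSortL_A array := by
  unfold counting_sort_negative csSortL_A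
  cases PySem.List.min? array (fun x => x) with
  | none => rfl
  | some low =>
  cases PySem.List.max? array (fun x => x) with
  | none => rfl
  | some high =>
  simp only []
  set c0A : Array Int := ((PySem.List.pyRange low (high + 1) 1).map (fun _ => (0 : Int))).toArray with hc0A
  set c0L : List Int := (PySem.List.pyRange low (high + 1) 1).map (fun _ => (0 : Int)) with hc0L
  have hf : ∀ (a : Array Int) (b : Int),
      (pyASet a (b - low) (pyAGet a (b - low) + 1)).toList
        = PySem.List.pySetD a.toList (b - low) (PySem.List.pyGetD a.toList (b - low) 0 + 1) := by
    intro a b; rw [pyASet_toList, pyAGet_eq]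
  have h1 : (array.foldl (fun c i => pyASet c (i - low) (pyAGet c (i - low) + 1)) c0A).toList
      = array.foldl (fun c i =>
          PySem.List.pySetD c (i - low) (PySem.List.pyGetD c (i - low) 0 + 1)) c0L := by
    rw [foldl_toList_bridge _ (fun (c : List Int) (i : Int) => PySem.List.pySetD c (i - low) (PySem.List.pyGetD c (i - low) 0 + 1)) hf, hc0A, List.toList_toArray, hc0L]
  have hsz : ((array.foldl (fun c i => pyASet c (i - low) (pyAGet c (i - low) + 1)) c0A).size : Int)
      = ((array.foldl (fun c i =>
          PySem.List.pySetD c (i - low) (PySem.List.pyGetD c (i - low) 0 + 1)) c0L).length : Int) := by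
    rw [← h1, Array.length_toList]
  rw [hsz]
  have hg : ∀ (a : Array Int) (b : Int),
      (pyASet a b (pyAGet a b + pyAGet a (b - 1))).toList
        = PySem.List.pySetD a.toList b (PySem.List.pyGetD a.toList b 0 + PySem.List.pyGetD a.toList (b - 1) 0) := by
    intro a b; rw [pyASet_toList, pyAGet_eq, pyAGet_eq]
  have h2 : ((PySem.List.pyRange 1 ((array.foldl (fun c i =>
          PySem.List.pySetD c (i - low) (PySem.List.pyGetD c (i - low) 0 + 1)) c0L).length : Int) 1).foldl
        (fun c j => pyASet c j (pyAGet c j + pyAGet c (j - 1)))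
        (array.foldl (fun c i => pyASet c (i - low) (pyAGet c (i - low) + 1)) c0A)).toList
      = (PySem.List.pyRange 1 ((array.foldl (fun c i =>
          PySem.List.pySetD c (i - low) (PySem.List.pyGetD c (i - low) 0 + 1)) c0L).length : Int) 1).foldl
        (fun c j => PySem.List.pySetD c j (PySem.List.pyGetD c j 0 + PySem.List.pyGetD c (j - 1) 0))
        (array.foldl (fun c i =>
          PySem.List.pySetD c (i - low) (PySem.List.pyGetD c (i - low) 0 + 1)) c0L) := by
    rw [foldl_toList_bridge _ (fun (c : List Int) (j : Int) => PySem.List.pySetD c j (PySem.List.pyGetD c j 0 + PySem.List.pyGetD c (j - 1) 0)) hg, h1]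
  have hs : ∀ (s : Array Int × List Int) (b : Int),
      (((pyASet s.1 (b - low) (pyAGet s.1 (b - low) - 1),
         PySem.List.pySetD s.2
           (pyAGet (pyASet s.1 (b - low) (pyAGet s.1 (b - low) - 1)) (b - low)) b) : Array Int × List Int).1.toList,
       ((pyASet s.1 (b - low) (pyAGet s.1 (b - low) - 1),
         PySem.List.pySetD s.2
           (pyAGet (pyASet s.1 (b - low) (pyAGet s.1 (b - low) - 1)) (b - low)) b) : Array Int × List Int).2)
      = (fun (s : List Int × List Int) i =>
          (PySem.List.pySetD s.1 (i - low) (PySem.List.pyGetD s.1 (i - low) 0 - 1),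
           PySem.List.pySetD s.2
             (PySem.List.pyGetD (PySem.List.pySetD s.1 (i - low) (PySem.List.pyGetD s.1 (i - low) 0 - 1)) (i - low) 0)
             i)) (s.1.toList, s.2) b := by
    intro s b
    simp only [pyAGet_eq, pyASet_toList]
  have hp := foldl_pair_bridge _ (fun (s : List Int × List Int) i =>
          (PySem.List.pySetD s.1 (i - low) (PySem.List.pyGetD s.1 (i - low) 0 - 1),
           PySem.List.pySetD s.2
             (PySem.List.pyGetD (PySem.List.pySetD s.1 (i - low) (PySem.List.pyGetD s.1 (i - low) 0 - 1)) (i - low) 0)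
             i)) hs array.reverse
  rw [show (array.reverse.foldl (fun (s : Array Int × List Int) i =>
        (pyASet s.1 (i - low) (pyAGet s.1 (i - low) - 1),
         PySem.List.pySetD s.2 (pyAGet (pyASet s.1 (i - low) (pyAGet s.1 (i - low) - 1)) (i - low)) i))
      ((PySem.List.pyRange 1 ((array.foldl (fun c i =>
          PySem.List.pySetD c (i - low) (PySem.List.pyGetD c (i - low) 0 + 1)) c0L).length : Int) 1).foldl
        (fun c j => pyASet c j (pyAGet c j + pyAGet c (j - 1)))
        (array.foldl (fun c i => pyASet c (i - low) (pyAGet c (i - low) + 1)) c0A),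
       PySem.List.pyRepeat [(0 : Int)] (array.length : Int))).2
      = (array.reverse.foldl (fun (s : List Int × List Int) i =>
          (PySem.List.pySetD s.1 (i - low) (PySem.List.pyGetD s.1 (i - low) 0 - 1),
           PySem.List.pySetD s.2
             (PySem.List.pyGetD (PySem.List.pySetD s.1 (i - low) (PySem.List.pyGetD s.1 (i - low) 0 - 1)) (i - low) 0)
             i))
        (((PySem.List.pyRange 1 ((array.foldl (fun c i =>
            PySem.List.pySetD c (i - low) (PySem.List.pyGetD c (i - low) 0 + 1)) c0L).length : Int) 1).foldl
          (fun c j => pyASet c j (pyAGet c j + pyAGet c (j - 1)))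
          (array.foldl (fun c i => pyASet c (i - low) (pyAGet c (i - low) + 1)) c0A)).toList,
         PySem.List.pyRepeat [(0 : Int)] (array.length : Int))).2
    from congrArg Prod.snd (hp _), h2]

theorem portB_models (array : List Int) : counting_sort_negative_alt array = csSortL_B array := by
  unfold counting_sort_negative_alt csSortL_B
  cases PySem.List.min? array (fun x => x) with
  | none => rfl
  | some low =>
  cases PySem.List.max? array (fun x => x) with
  | none => rfl
  | some high =>
  simp only []
  set c0A : Array Int := (PySem.List.pyRepeat [(0 : Int)] (high - low + 1)).toArray with hc0A
  set c0L : List Int := PySem.List.pyRepeat [(0 : Int)] (high - low + 1) with hc0L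
  have hf : ∀ (a : Array Int) (b : Int),
      (pyASet a (b - low) (pyAGet a (b - low) + 1)).toList
        = PySem.List.pySetD a.toList (b - low) (PySem.List.pyGetD a.toList (b - low) 0 + 1) := by
    intro a b; rw [pyASet_toList, pyAGet_eq]
  have h1 : (array.foldl (fun c i => pyASet c (i - low) (pyAGet c (i - low) + 1)) c0A).toList
      = array.foldl (fun c i =>
          PySem.List.pySetD c (i - low) (PySem.List.pyGetD c (i - low) 0 + 1)) c0L := by
    rw [foldl_toList_bridge _ (fun (c : List Int) (i : Int) => PySem.List.pySetD c (i - low) (PySem.List.pyGetD c (i - low) 0 + 1)) hf, hc0A, List.toList_toArray, hc0L]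
  have hsz : ((array.foldl (fun c i => pyASet c (i - low) (pyAGet c (i - low) + 1)) c0A).size : Int)
      = ((array.foldl (fun c i =>
          PySem.List.pySetD c (i - low) (PySem.List.pyGetD c (i - low) 0 + 1)) c0L).length : Int) := by
    rw [← h1, Array.length_toList]
  rw [hsz]
  have hfun : (fun (res : List Int) (j : Int) =>
        res ++ PySem.List.pyRepeat [low + j]
          (pyAGet (array.foldl (fun c i => pyASet c (i - low) (pyAGet c (i - low) + 1)) c0A) j))
      = (fun (res : List Int) (j : Int) =>
        res ++ PySem.List.pyRepeat [low + j]
          (PySem.List.pyGetD (array.foldl (fun c i =>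
            PySem.List.pySetD c (i - low) (PySem.List.pyGetD c (i - low) 0 + 1)) c0L) j 0)) := by
    funext res j
    rw [pyAGet_eq, h1]
  rw [hfun]

-- ===== VERDICT (by name: the statement is the Claim_ definition above) =====
theorem counting_sort_negative_spec : Claim_equal_counting_sort_negative := by
  intro array _ hpre
  unfold Spec_counting_sort_negative
  rw [portA_models, portB_models]
  exact cs_main array hpre
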